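-- pv_equiv track=rewrite | github.com/updaun/CodingTest | programmers/221105_1.py | solution
-- ===== SOURCE A (Python) =====
-- def solution(line):
--     trigger = False
--     temp = ''
--     answer = ''
--     for s in line:
--         if s == temp:
--             trigger = True
--         else:
--             trigger = False
--         temp = s
--         if trigger and answer[-1] != "*":
--             answer += "*"
--         elif not trigger:
--             answer += s
--     return answer
-- ===== SOURCE B (Python) =====
-- def solution(line):
--     res = []
--     n = len(line)
--     i = 0
--     while i < n:
--         c = line[i]
--         j = i + 1
--         while j < n and line[j] == c:
--             j += 1
--         res.append(c)
--         if j - i > 1: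
--             res.append('*')
--         i = j
--     return ''.join(res)
-- ===== Notes on version B (the rewrite author's own statement) =====
-- stated objective: alternative
-- what changed: Replaces A's per-character state machine (trigger/temp flags plus inspecting the last character of the accumulated answer) with a two-pointer run-length scan that emits each run's character and an asterisk marker for runs longer than 1.
-- intended difference: On strings containing two adjacent asterisks A collapses the duplicated-asterisk run to a single character with no duplicate marker (the run character collides with A's own marker sentinel), while B emits the run character followed by the duplicate marker like every other duplicated run, which is the intended behaviour. — e.g. on solution("**"): A returns "*", B returns "**"
import Mathlib
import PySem

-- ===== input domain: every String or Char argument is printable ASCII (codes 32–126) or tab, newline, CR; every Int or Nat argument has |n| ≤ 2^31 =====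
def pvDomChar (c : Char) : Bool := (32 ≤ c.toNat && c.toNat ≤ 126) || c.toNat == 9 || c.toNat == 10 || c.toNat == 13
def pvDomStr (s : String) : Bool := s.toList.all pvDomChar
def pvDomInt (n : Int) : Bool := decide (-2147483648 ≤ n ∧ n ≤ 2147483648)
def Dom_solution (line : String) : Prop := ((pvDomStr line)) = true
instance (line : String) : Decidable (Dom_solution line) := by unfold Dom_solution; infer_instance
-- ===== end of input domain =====

-- B rewrites A's stateful character machine as a two-pointer run scan that marks every
-- duplicate run; outside D_ (strings with two adjacent asterisks, where A leaves a run unmarked)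
-- the two agree.

-- ===== PORT A =====
-- A's loop body: trigger = (s == temp); temp starts as '' which equals no single character,
-- modelled as Option Char starting at none. answer[-1] is read with PySem.List.pyGet?; its
-- .getD ' ' is unreachable (trigger is false on the first character, so answer is nonempty
-- whenever trigger holds).
def stepA (st : Option Char × List Char) (s : Char) : Option Char × List Char :=
  let trigger : Bool := some s == st.1
  if trigger && !(((PySem.List.pyGet? st.2 (-1)).getD ' ') == '*') then
    (some s, st.2 ++ ['*'])
  else if !trigger then
    (some s, st.2 ++ [s])
  else
    (some s, st.2)

def solution (line : String) : String :=
  String.ofList ((line.toList.foldl stepA (none, [])).2)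

-- ===== PORT B =====
-- inner while of Source B: advance j while j < n and line[j] == c
def bRun (cs : List Char) (n : Nat) (c : Char) (j : Nat) : Nat :=
  if h : j < n ∧ cs.getD j ' ' = c then bRun cs n c (j + 1) else j
termination_by n - j
decreasing_by omega

theorem bRun_ge (cs : List Char) (n : Nat) (c : Char) (j : Nat) : j ≤ bRun cs n c j := by
  unfold bRun
  split
  · have := bRun_ge cs n c (j + 1); omega
  · exact le_refl j
termination_by n - j
decreasing_by simp_all; omega

-- outer while of Source B: emit the run head, and an asterisk marker for runs longer than 1
def bLoop (cs : List Char) (n : Nat) (i : Nat) : List Char :=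
  if _h : i < n then
    let c := cs.getD i ' '
    let j := bRun cs n c (i + 1)
    c :: (if 1 < j - i then ['*'] else []) ++ bLoop cs n j
  else []
termination_by n - i
decreasing_by have := bRun_ge cs n (cs.getD i ' ') (i + 1); omega

def solution_alt (line : String) : String :=
  String.ofList (bLoop line.toList line.toList.length 0)

-- ===== PRECONDITION & SPEC =====
-- On strings containing two adjacent asterisks A collapses the duplicated-asterisk run to a
-- single character with no duplicate marker (the run character collides with A's own marker
-- sentinel), while B emits the run character followed by the duplicate marker like every
-- other duplicated run, which is the intended behaviour.
-- single tail-recursive scan: state = (found an adjacent asterisk pair so far, previous char was an asterisk)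
def pvStarStep (st : Bool × Bool) (c : Char) : Bool × Bool :=
  (st.1 || (st.2 && c == '*'), c == '*')

def D_solution (line : String) : Prop :=
  (line.toList.foldl pvStarStep (false, false)).1 = true
instance (line : String) : Decidable (D_solution line) := by unfold D_solution; infer_instance

def Spec_solution (line : String) (out : String) : Prop :=
  ¬ D_solution line → out = solution_alt line
instance (line : String) (out : String) : Decidable (Spec_solution line out) := by
  unfold Spec_solution; infer_instance

def pvDiffWitness_solution : String := "**"
def pvDiffWitnessOut_solution : String × String := ("*", "**")

-- ===== CLAIM (what is proved, stated in full; the proofs are below) =====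
def Claim_unchanged_solution : Prop :=
  ∀ (line : String), Dom_solution line → Spec_solution line (solution line)
def Claim_changed_solution : Prop :=
  Dom_solution (pvDiffWitness_solution) ∧ D_solution (pvDiffWitness_solution) ∧
  solution (pvDiffWitness_solution) = pvDiffWitnessOut_solution.1 ∧
  solution_alt (pvDiffWitness_solution) = pvDiffWitnessOut_solution.2 ∧
  pvDiffWitnessOut_solution.1 ≠ pvDiffWitnessOut_solution.2
def Claim_exact_solution : Prop :=
  ∀ (line : String), Dom_solution line → D_solution line → solution line ≠ solution_alt line

-- ===== LEMMAS AND PROOFS =====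

-- A's per-run output, literally: like bLoop but a run of asterisks never gets the marker
def aLoop (cs : List Char) (n : Nat) (i : Nat) : List Char :=
  if _h : i < n then
    let c := cs.getD i ' '
    let j := bRun cs n c (i + 1)
    c :: (if 2 ≤ j - i ∧ c ≠ '*' then ['*'] else []) ++ aLoop cs n j
  else []
termination_by n - i
decreasing_by have := bRun_ge cs n (cs.getD i ' ') (i + 1); omega

theorem scan_mono (cs : List Char) : ∀ p : Bool, (List.foldl pvStarStep (true, p) cs).1 = true := by
  induction cs with
  | nil => intro p; rfl
  | cons c rest ih => intro p; simpa [pvStarStep] using ih (c == '*')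

theorem scan_noSS (cs : List Char) : ∀ p : Bool,
    (List.foldl pvStarStep (false, p) cs).1 = false →
    ∀ q, q + 1 < cs.length → ¬(cs.getD q ' ' = '*' ∧ cs.getD (q + 1) ' ' = '*') := by
  induction cs with
  | nil => intro p _ q hq; simp at hq
  | cons c rest ih =>
    intro p h q hq
    rw [List.foldl_cons] at h
    have hstep : pvStarStep (false, p) c = (p && c == '*', c == '*') := by
      simp [pvStarStep]
    rw [hstep] at h
    have hpc : (p && c == '*') = false := by
      by_contra hb
      rw [Bool.not_eq_false] at hb
      rw [hb, scan_mono rest (c == '*')] at h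
      simp at h
    rw [hpc] at h
    match q with
    | 0 =>
      intro ⟨ha, hb⟩
      simp only [List.getD_cons_zero] at ha
      simp only [List.getD_cons_succ] at hb
      match rest, hq with
      | r0 :: rest', _ =>
        simp only [List.getD_cons_zero] at hb
        rw [List.foldl_cons] at h
        have : pvStarStep (false, c == '*') r0 = (true, true) := by
          simp [pvStarStep, ha, hb]
        rw [this, scan_mono rest' true] at h
        simp at h
    | q' + 1 =>
      intro ⟨ha, hb⟩
      simp only [List.getD_cons_succ] at ha hb
      exact ih (c == '*') h q' (by simp at hq ⊢; omega) ⟨ha, hb⟩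

theorem stepA_ne (s : Char) (temp : Option Char) (ans : List Char) (h : temp ≠ some s) :
    stepA (temp, ans) s = (some s, ans ++ [s]) := by
  have hne : ¬(some s = temp) := fun he => h he.symm
  simp [stepA, hne]

theorem stepA_last_star (c : Char) (ans : List Char) :
    stepA (some c, ans ++ ['*']) c = (some c, ans ++ ['*']) := by
  simp [stepA, PySem.List.pyGet?_neg_one_append_singleton]

theorem foldA_tail (c : Char) (rest : List Char) (m : Nat) (ans : List Char) :
    List.foldl stepA (some c, ans ++ ['*']) (List.replicate m c ++ rest)
      = List.foldl stepA (some c, ans ++ ['*']) rest := by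
  induction m with
  | zero => simp
  | succ m ih => simpa [List.replicate_succ, stepA_last_star] using ih

theorem foldA_run (c : Char) (k : Nat) (rest ans : List Char) (temp : Option Char)
    (ht : temp ≠ some c) (hk : 1 ≤ k) :
    List.foldl stepA (temp, ans) (List.replicate k c ++ rest)
      = List.foldl stepA
          (some c, (ans ++ [c]) ++ (if 2 ≤ k ∧ c ≠ '*' then ['*'] else [])) rest := by
  obtain ⟨m, rfl⟩ : ∃ m, k = m + 1 := ⟨k - 1, by omega⟩
  rw [List.replicate_succ, List.cons_append, List.foldl_cons, stepA_ne c temp ans ht]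
  cases m with
  | zero => simp
  | succ m' =>
    have h2 : 2 ≤ m' + 1 + 1 := by omega
    rw [List.replicate_succ, List.cons_append, List.foldl_cons]
    by_cases hstar : c = '*'
    · subst hstar
      rw [stepA_last_star, if_neg (by simp), List.append_nil]
      exact foldA_tail '*' rest m' ans
    · have hstep : stepA (some c, ans ++ [c]) c = (some c, (ans ++ [c]) ++ ['*']) := by
        simp [stepA, PySem.List.pyGet?_neg_one_append_singleton, hstar]
      rw [hstep, if_pos ⟨h2, hstar⟩]
      exact foldA_tail c rest m' (ans ++ [c])

theorem bRun_le (cs : List Char) (n : Nat) (c : Char) (j : Nat) (h : j ≤ n) :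
    bRun cs n c j ≤ n := by
  unfold bRun
  split
  · exact bRun_le cs n c (j + 1) (by omega)
  · exact h
termination_by n - j
decreasing_by simp_all; omega

theorem bRun_run (cs : List Char) (n : Nat) (c : Char) (j : Nat) :
    ∀ m, j ≤ m → m < bRun cs n c j → cs.getD m ' ' = c := by
  intro m hjm hm
  rw [bRun] at hm
  split at hm
  · rename_i hg
    rcases Nat.eq_or_lt_of_le hjm with rfl | hlt
    · exact hg.2
    · exact bRun_run cs n c (j + 1) m hlt hm
  · omega
termination_by n - j
decreasing_by omega

theorem bRun_stop (cs : List Char) (n : Nat) (c : Char) (j : Nat)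
    (h : bRun cs n c j < n) : cs.getD (bRun cs n c j) ' ' ≠ c := by
  rw [bRun] at h ⊢
  split at h
  · rename_i hg
    rw [dif_pos hg] at *
    exact bRun_stop cs n c (j + 1) h
  · rename_i hg
    rw [dif_neg hg]
    intro hc
    exact hg ⟨h, hc⟩
termination_by n - j
decreasing_by omega

theorem drop_run (cs : List Char) (c : Char) (i j : Nat) (hij : i ≤ j)
    (hjn : j ≤ cs.length) (hrun : ∀ m, i ≤ m → m < j → cs.getD m ' ' = c) :
    cs.drop i = List.replicate (j - i) c ++ cs.drop j := by
  rcases Nat.eq_or_lt_of_le hij with rfl | hlt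
  · simp
  · have hi : i < cs.length := lt_of_lt_of_le hlt hjn
    have hc : cs[i] = c := by
      have := hrun i (le_refl i) hlt
      rwa [List.getD_eq_getElem?_getD, List.getElem?_eq_getElem hi, Option.getD_some] at this
    have hk : j - i = (j - (i + 1)) + 1 := by omega
    rw [List.drop_eq_getElem_cons hi, hc, hk, List.replicate_succ, List.cons_append]
    congr 1
    exact drop_run cs c (i + 1) j hlt hjn (fun m hm hm' => hrun m (by omega) hm')
termination_by j - i

theorem mainA (cs : List Char)
    (i : Nat) (temp : Option Char) (ans : List Char)
    (htemp : i < cs.length → temp ≠ some (cs.getD i ' ')) :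
    (List.foldl stepA (temp, ans) (cs.drop i)).2 = ans ++ aLoop cs cs.length i := by
  by_cases hi : i < cs.length
  · have hc : cs.getD i ' ' = cs.getD i ' ' := rfl
    set c := cs.getD i ' ' with hcdef
    set j := bRun cs cs.length c (i + 1) with hjdef
    have hj1 : i + 1 ≤ j := bRun_ge cs cs.length c (i + 1)
    have hjn : j ≤ cs.length := bRun_le cs cs.length c (i + 1) (by omega)
    have hrun : ∀ m, i ≤ m → m < j → cs.getD m ' ' = c := by
      intro m hm hm'
      rcases Nat.eq_or_lt_of_le hm with rfl | hlt
      · rfl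
      · exact bRun_run cs cs.length c (i + 1) m hlt hm'
    have hdrop : cs.drop i = List.replicate (j - i) c ++ cs.drop j :=
      drop_run cs c i j (by omega) hjn hrun
    have hrec := mainA cs j (some c) ((ans ++ [c]) ++ (if 2 ≤ j - i ∧ c ≠ '*' then ['*'] else []))
      (fun hj => by
        intro hcon
        exact bRun_stop cs cs.length c (i + 1) hj (Option.some.inj hcon).symm)
    rw [hdrop, foldA_run c (j - i) (cs.drop j) ans temp (htemp hi) (by omega), hrec]
    conv_rhs => rw [aLoop]
    rw [dif_pos hi]
    show (ans ++ [c] ++ (if 2 ≤ j - i ∧ c ≠ '*' then ['*'] else [])) ++ aLoop cs cs.length j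
        = ans ++ (c :: ((if 2 ≤ j - i ∧ c ≠ '*' then ['*'] else []) ++ aLoop cs cs.length j))
    simp [List.append_assoc]
  · have hdrop : cs.drop i = [] := List.drop_eq_nil_of_le (by omega)
    rw [hdrop]
    conv_rhs => rw [aLoop]
    rw [dif_neg hi]
    simp
termination_by cs.length - i
decreasing_by
  have hb := bRun_ge cs cs.length (cs.getD i ' ') (i + 1)
  omega

theorem aLoop_eq_bLoop (cs : List Char)
    (noSS : ∀ p, p + 1 < cs.length →
      ¬(cs.getD p ' ' = '*' ∧ cs.getD (p + 1) ' ' = '*'))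
    (i : Nat) : aLoop cs cs.length i = bLoop cs cs.length i := by
  rw [aLoop, bLoop]
  by_cases hi : i < cs.length
  · rw [dif_pos hi, dif_pos hi]
    set c := cs.getD i ' ' with hcdef
    set j := bRun cs cs.length c (i + 1) with hjdef
    have hj1 : i + 1 ≤ j := bRun_ge cs cs.length c (i + 1)
    have hjn : j ≤ cs.length := bRun_le cs cs.length c (i + 1) (by omega)
    have hcond : (2 ≤ j - i ∧ c ≠ '*') ↔ 1 < j - i := by
      constructor
      · intro h; omega
      · intro h
        refine ⟨by omega, ?_⟩
        intro hcs
        have hi1 : i + 1 < cs.length := by omega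
        refine noSS i hi1 ⟨by rw [← hcdef, hcs], ?_⟩
        rw [bRun_run cs cs.length c (i + 1) (i + 1) (le_refl _) (by omega), hcs]
    show (c :: (if 2 ≤ j - i ∧ c ≠ '*' then ['*'] else [])) ++ aLoop cs cs.length j
        = (c :: (if 1 < j - i then ['*'] else [])) ++ bLoop cs cs.length j
    rw [if_congr hcond rfl rfl, aLoop_eq_bLoop cs noSS j]
  · rw [dif_neg hi, dif_neg hi]
termination_by cs.length - i
decreasing_by have := bRun_ge cs cs.length (cs.getD i ' ') (i + 1); omega

theorem aLoop_len_le (cs : List Char) (n : Nat) (i : Nat) :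
    (aLoop cs n i).length ≤ (bLoop cs n i).length := by
  rw [aLoop, bLoop]
  by_cases hi : i < n
  · rw [dif_pos hi, dif_pos hi]
    set c := cs.getD i ' ' with hcdef
    set j := bRun cs n c (i + 1) with hjdef
    have hrec := aLoop_len_le cs n j
    show ((c :: (if 2 ≤ j - i ∧ c ≠ '*' then ['*'] else [])) ++ aLoop cs n j).length
        ≤ ((c :: (if 1 < j - i then ['*'] else [])) ++ bLoop cs n j).length
    simp only [List.length_append, List.length_cons]
    split_ifs <;> simp only [List.length_singleton, List.length_nil] <;> omega
  · rw [dif_neg hi, dif_neg hi]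
termination_by n - i
decreasing_by have := bRun_ge cs n (cs.getD i ' ') (i + 1); omega

theorem aLoop_len_lt (cs : List Char) (i : Nat) (p : Nat) (hp : i ≤ p)
    (hp1 : p + 1 < cs.length) (hs1 : cs.getD p ' ' = '*')
    (hs2 : cs.getD (p + 1) ' ' = '*') :
    (aLoop cs cs.length i).length < (bLoop cs cs.length i).length := by
  have hi : i < cs.length := by omega
  rw [aLoop, bLoop, dif_pos hi, dif_pos hi]
  set c := cs.getD i ' ' with hcdef
  set j := bRun cs cs.length c (i + 1) with hjdef
  have hj1 : i + 1 ≤ j := bRun_ge cs cs.length c (i + 1)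
  have hjn : j ≤ cs.length := bRun_le cs cs.length c (i + 1) (by omega)
  show ((c :: (if 2 ≤ j - i ∧ c ≠ '*' then ['*'] else [])) ++ aLoop cs cs.length j).length
      < ((c :: (if 1 < j - i then ['*'] else [])) ++ bLoop cs cs.length j).length
  simp only [List.length_append, List.length_cons]
  by_cases hstar : c = '*' ∧ 1 < j - i
  · have hle := aLoop_len_le cs cs.length j
    rw [if_neg (fun h => h.2 hstar.1), if_pos (by omega)]
    simp only [List.length_singleton, List.length_nil]
    omega
  · have hpj : j ≤ p := by
      by_contra hpj
      rw [Nat.not_le] at hpj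
      have hpc : cs.getD p ' ' = c := by
        rcases Nat.eq_or_lt_of_le hp with rfl | hlt
        · rw [← hcdef]
        · exact bRun_run cs cs.length c (i + 1) p hlt hpj
      have hcstar : c = '*' := by rw [← hpc, hs1]
      rcases Nat.lt_or_ge (p + 1) j with hpj1 | hpj1
      · exact hstar ⟨hcstar, by omega⟩
      · have hje : j = p + 1 := by omega
        refine bRun_stop cs cs.length c (i + 1) (by omega) ?_
        rw [← hjdef, hje, hs2, hcstar]
    have hrec := aLoop_len_lt cs j p hpj hp1 hs1 hs2
    have hifeq : (if 2 ≤ j - i ∧ c ≠ '*' then ['*'] else ([] : List Char))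
        = (if 1 < j - i then ['*'] else []) := by
      by_cases hcs : c = '*'
      · rw [if_neg (fun h => h.2 hcs), if_neg (fun h => hstar ⟨hcs, h⟩)]
      · exact if_congr ⟨fun h => by omega, fun h => ⟨by omega, hcs⟩⟩ rfl rfl
    rw [hifeq]
    omega
termination_by cs.length - i
decreasing_by have := bRun_ge cs cs.length (cs.getD i ' ') (i + 1); omega

theorem scan_exists (cs : List Char) : ∀ p : Bool,
    (List.foldl pvStarStep (false, p) cs).1 = true →
    (∃ q, q + 1 < cs.length ∧ cs.getD q ' ' = '*' ∧ cs.getD (q + 1) ' ' = '*') ∨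
      (p = true ∧ cs.getD 0 ' ' = '*' ∧ 0 < cs.length) := by
  induction cs with
  | nil => intro p h; simp at h
  | cons c rest ih =>
    intro p h
    rw [List.foldl_cons] at h
    have hstep : pvStarStep (false, p) c = (p && c == '*', c == '*') := by
      simp [pvStarStep]
    rw [hstep] at h
    by_cases hb : (p && (c == '*')) = true
    · rw [Bool.and_eq_true] at hb
      right
      refine ⟨hb.1, ?_, by simp⟩
      have hc : c = '*' := by simpa using hb.2
      simpa [List.getD_cons_zero] using hc
    · rw [Bool.not_eq_true] at hb
      rw [hb] at h
      rcases ih (c == '*') h with ⟨q, hq, h1, h2⟩ | ⟨hc, hr0, hlen⟩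
      · exact Or.inl ⟨q + 1, by simp at hq ⊢; omega, by simpa using h1, by simpa using h2⟩
      · refine Or.inl ⟨0, by simp; omega, ?_, ?_⟩
        · have hcs : c = '*' := by simpa using hc
          simpa [List.getD_cons_zero] using hcs
        · simpa [List.getD_cons_succ] using hr0

-- ===== VERDICT (by name: the statement is the Claim_ definition above) =====
theorem solution_spec : Claim_unchanged_solution := by
  intro line _ hD
  unfold solution solution_alt
  have noSS : ∀ p, p + 1 < line.toList.length →
      ¬(line.toList.getD p ' ' = '*' ∧ line.toList.getD (p + 1) ' ' = '*') :=
    scan_noSS line.toList false (by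
      unfold D_solution at hD
      exact eq_false_of_ne_true hD)
  have h := mainA line.toList 0 none [] (fun _ => by simp)
  rw [List.drop_zero] at h
  rw [h, aLoop_eq_bLoop line.toList noSS 0]
  simp

theorem solution_changed : Claim_changed_solution := by
  unfold Claim_changed_solution
  refine ⟨by decide, by decide, by decide, ?_, by decide⟩
  show solution_alt "**" = "**"
  have h2 : bRun ['*', '*'] 2 '*' 2 = 2 := by rw [bRun]; simp
  have h1 : bRun ['*', '*'] 2 '*' 1 = 2 := by rw [bRun]; simp [h2]
  have h3 : bLoop ['*', '*'] 2 2 = [] := by rw [bLoop]; simp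
  have h0 : bLoop ['*', '*'] 2 0 = ['*', '*'] := by
    rw [bLoop]; simp [h1, h3]
  have hls : "**".toList = ['*', '*'] := by decide
  unfold solution_alt
  rw [hls]
  simp [h0]

theorem solution_tight : Claim_exact_solution := by
  intro line _ hd heq
  unfold D_solution at hd
  rcases scan_exists line.toList false hd with ⟨q, hq, h1, h2⟩ | ⟨hfalse, _⟩
  · have ha := mainA line.toList 0 none [] (fun _ => by simp)
    rw [List.drop_zero] at ha
    have hlt := aLoop_len_lt line.toList 0 q (Nat.zero_le q) hq h1 h2
    unfold solution solution_alt at heq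
    rw [ha, List.nil_append] at heq
    have : aLoop line.toList line.toList.length 0 = bLoop line.toList line.toList.length 0 := by
      have := congrArg String.toList heq
      simpa using this
    rw [this] at hlt
    exact lt_irrefl _ hlt
  · exact absurd hfalse (by simp)
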